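-- pv_equiv track=rewrite | github.com/AlexandreCourtin/42-n-puzzle | utils/matrix_utils.py | change_tile
-- ===== SOURCE A (Python) =====
-- def change_tile(current_matrix, length, paramX, paramY): # OPTI THIS
-- 	result_matrix = [ [ -1 for i in range(length) ] for j in range(length) ]
--
-- 	changedTile = False
-- 	savedX = -1
-- 	savedY = -1
-- 	for i in range(length):
-- 		for j in range(length):
-- 			current_matrix_value = current_matrix[i][j]
-- 			if current_matrix_value == 0 and not changedTile:
-- 				if paramX != 0 and j + paramX < length and j + paramX >= 0:
-- 					result_matrix[i][j] = current_matrix[i][j + paramX]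
-- 					result_matrix[i][j + paramX] = 0
-- 					savedX = j + paramX
-- 					savedY = i
-- 					changedTile = True
-- 				elif paramY != 0 and i + paramY < length and i + paramY >= 0:
-- 					result_matrix[i][j] = current_matrix[i + paramY][j]
-- 					result_matrix[i + paramY][j] = 0
-- 					savedX = j
-- 					savedY = i + paramY
-- 					changedTile = True
-- 				else:
-- 					return None
-- 			elif i != savedY or j != savedX:
-- 				result_matrix[i][j] = current_matrix_value
--
-- 	return result_matrix
-- ===== SOURCE B (Python) =====
-- def change_tile(current_matrix, length, paramX, paramY):
--     # locate the first zero (row-major) in the length x length window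
--     pos = next(((i, j) for i in range(length) for j in range(length)
--                 if current_matrix[i][j] == 0), None)
--     if pos is not None:
--         # decide the swap before touching the rest of the matrix
--         i, j = pos
--         if paramX != 0 and 0 <= j + paramX < length:
--             ti, tj = i, j + paramX
--         elif paramY != 0 and 0 <= i + paramY < length:
--             ti, tj = i + paramY, j
--         else:
--             return None
--     # fresh length x length copy of the window (the input is never mutated)
--     result = [[current_matrix[i][j] for j in range(length)] for i in range(length)]
--     if pos is None:
--         return result
--     result[pos[0]][pos[1]] = current_matrix[ti][tj]
--     result[ti][tj] = 0
--     return result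
-- ===== Notes on version B (the rewrite author's own statement) =====
-- stated objective: simpler
-- what changed: A's single fused pass with per-cell state (changedTile/savedX/savedY, write-or-skip at every cell) is replaced by a three-step decomposition: find the first zero in the window, decide the one swap (or return None) right there, then copy the length-by-length window and apply the swap; the pass-wide mutable state disappears. Pre_ excludes matrices with fewer than `length` rows or short rows inside the window: there A raises IndexError (except when an earlier unswappable zero makes it return None first, where B also returns None) and the total Lean ports cannot model the raise.
-- outside the precondition, e.g. on change_tile([[0]], 2, 0, 0): A returns None, B returns None
import Mathlib
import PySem

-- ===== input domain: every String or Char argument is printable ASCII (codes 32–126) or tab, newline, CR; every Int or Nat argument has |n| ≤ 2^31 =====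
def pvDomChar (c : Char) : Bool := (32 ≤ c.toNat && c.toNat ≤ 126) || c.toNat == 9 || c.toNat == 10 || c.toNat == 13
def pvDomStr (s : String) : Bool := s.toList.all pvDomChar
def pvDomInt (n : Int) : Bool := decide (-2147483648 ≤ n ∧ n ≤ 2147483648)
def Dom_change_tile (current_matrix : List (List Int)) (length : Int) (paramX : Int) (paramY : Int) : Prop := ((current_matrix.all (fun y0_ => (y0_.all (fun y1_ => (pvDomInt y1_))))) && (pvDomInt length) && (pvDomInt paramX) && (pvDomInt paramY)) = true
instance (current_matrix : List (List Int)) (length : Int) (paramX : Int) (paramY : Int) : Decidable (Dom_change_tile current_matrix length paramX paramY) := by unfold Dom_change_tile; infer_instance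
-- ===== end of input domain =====

-- B replaces A's fused scan with per-cell state (changedTile/savedX/savedY) by
-- find-first-zero, decide the swap (or return None), copy the window, apply the swap;
-- objective: simpler.

-- ===== PORT A =====
-- current_matrix[i][j] (every access the programs make is in range under Pre_; the default is never read there)
def pvGet2 (m : List (List Int)) (i j : Int) : Int :=
  PySem.List.pyGetD (PySem.List.pyGetD m i []) j 0

-- result[i][j] = v (every write both programs make has 0 <= i,j < length, in range of the fresh result)
def pvSet2 (m : List (List Int)) (i j : Int) (v : Int) : List (List Int) :=
  PySem.List.pySetD m i (PySem.List.pySetD (PySem.List.pyGetD m i []) j v)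

-- the body of A's inner loop (state: result_matrix, changedTile, savedX, savedY; none = "returned None")
def pvChangeStep (cm : List (List Int)) (length paramX paramY : Int)
    (st : Option (List (List Int) × Bool × Int × Int)) (i j : Int) :
    Option (List (List Int) × Bool × Int × Int) :=
  match st with
  | none => none
  | some (res, changedTile, savedX, savedY) =>
    let v := pvGet2 cm i j
    if v = 0 ∧ changedTile = false then
      if paramX ≠ 0 ∧ j + paramX < length ∧ j + paramX ≥ 0 then
        some (pvSet2 (pvSet2 res i j (pvGet2 cm i (j + paramX))) i (j + paramX) 0,
              true, j + paramX, i)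
      else if paramY ≠ 0 ∧ i + paramY < length ∧ i + paramY ≥ 0 then
        some (pvSet2 (pvSet2 res i j (pvGet2 cm (i + paramY) j)) (i + paramY) j 0,
              true, j, i + paramY)
      else none
    else if i ≠ savedY ∨ j ≠ savedX then
      some (pvSet2 res i j v, changedTile, savedX, savedY)
    else
      some (res, changedTile, savedX, savedY)

def change_tile (current_matrix : List (List Int)) (length : Int) (paramX : Int) (paramY : Int) : Option (List (List Int)) :=
  let rng := PySem.List.pyRange 0 length 1
  let result0 : List (List Int) := rng.map (fun _ => rng.map (fun _ => (-1 : Int)))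
  let final := rng.foldl
    (fun st i => rng.foldl (fun st j => pvChangeStep current_matrix length paramX paramY st i j) st)
    (some (result0, false, (-1 : Int), (-1 : Int)))
  final.map (fun s => s.1)

-- ===== PORT B =====
def change_tile_alt (current_matrix : List (List Int)) (length : Int) (paramX : Int) (paramY : Int) : Option (List (List Int)) :=
  let rng := PySem.List.pyRange 0 length 1
  -- pos = next(((i, j) ... if current_matrix[i][j] == 0), None)
  let pos := (rng.flatMap (fun i => rng.map (fun j => (i, j)))).find?
      (fun p => pvGet2 current_matrix p.1 p.2 == 0)
  match pos with
  | none =>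
    -- result = [[current_matrix[i][j] for j ...] for i ...]; return result
    some (rng.map (fun i => rng.map (fun j => pvGet2 current_matrix i j)))
  | some (i, j) =>
    -- decide the swap first (or return None), then copy and apply it
    if paramX ≠ 0 ∧ 0 ≤ j + paramX ∧ j + paramX < length then
      let result := rng.map (fun i => rng.map (fun j => pvGet2 current_matrix i j))
      some (pvSet2 (pvSet2 result i j (pvGet2 current_matrix i (j + paramX))) i (j + paramX) 0)
    else if paramY ≠ 0 ∧ 0 ≤ i + paramY ∧ i + paramY < length then
      let result := rng.map (fun i => rng.map (fun j => pvGet2 current_matrix i j))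
      some (pvSet2 (pvSet2 result i j (pvGet2 current_matrix (i + paramY) j)) (i + paramY) j 0)
    else none

-- ===== PRECONDITION & SPEC =====
-- Pre_ excludes matrices with fewer than `length` rows, or a short row inside the window:
-- there A raises IndexError — except when an earlier unswappable zero makes it return None
-- first, where B also returns None (see claim cites) — and the total Lean ports (defaulting
-- access) cannot model the raise.
def Pre_change_tile (current_matrix : List (List Int)) (length : Int) (paramX : Int) (paramY : Int) : Prop :=
  length ≤ (current_matrix.length : Int) ∧
  ∀ r ∈ current_matrix.take length.toNat, length ≤ (r.length : Int)
instance (current_matrix : List (List Int)) (length : Int) (paramX : Int) (paramY : Int) : Decidable (Pre_change_tile current_matrix length paramX paramY) := by unfold Pre_change_tile; infer_instance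

def pvWitness_change_tile : List (List Int) × Int × Int × Int := ([[0, 1], [2, 3]], 2, 1, 0)

def Spec_change_tile (current_matrix : List (List Int)) (length : Int) (paramX : Int) (paramY : Int) (out : Option (List (List Int))) : Prop := out = change_tile_alt current_matrix length paramX paramY
instance (current_matrix : List (List Int)) (length : Int) (paramX : Int) (paramY : Int) (out : Option (List (List Int))) : Decidable (Spec_change_tile current_matrix length paramX paramY out) := by unfold Spec_change_tile; infer_instance

-- ===== CLAIM (what is proved, stated in full; the proofs are below) =====
def Claim_equal_change_tile : Prop := ∀ (current_matrix : List (List Int)) (length : Int) (paramX : Int) (paramY : Int), Dom_change_tile current_matrix length paramX paramY → Pre_change_tile current_matrix length paramX paramY → Spec_change_tile current_matrix length paramX paramY (change_tile current_matrix length paramX paramY)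


-- ===== LEMMAS AND PROOFS =====

-- proof-side abbreviations
def pvCells (L : Int) : List (Int × Int) :=
  (PySem.List.pyRange 0 L 1).flatMap (fun i => (PySem.List.pyRange 0 L 1).map (fun j => (i, j)))

def pvG (m : List (List Int)) (p : Int × Int) : Int := pvGet2 m p.1 p.2

def pvCopy (m : List (List Int)) (r : List (List Int)) (p : Int × Int) : List (List Int) :=
  pvSet2 r p.1 p.2 (pvG m p)

-- s = (savedX, savedY)
def pvSkip (m : List (List Int)) (s : Int × Int) (r : List (List Int)) (p : Int × Int) : List (List Int) :=
  if p.1 ≠ s.2 ∨ p.2 ≠ s.1 then pvCopy m r p else r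

def pvInW (L : Int) (p : Int × Int) : Prop := 0 ≤ p.1 ∧ p.1 < L ∧ 0 ≤ p.2 ∧ p.2 < L

def pvShape (L : Int) (r : List (List Int)) : Prop :=
  r.length = L.toNat ∧ ∀ row ∈ r, row.length = L.toNat

def pvR0 (L : Int) : List (List Int) :=
  (PySem.List.pyRange 0 L 1).map (fun _ => (PySem.List.pyRange 0 L 1).map (fun _ => (-1 : Int)))

def pvCopyM (m : List (List Int)) (L : Int) : List (List Int) :=
  (PySem.List.pyRange 0 L 1).map (fun i => (PySem.List.pyRange 0 L 1).map (fun j => pvGet2 m i j))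

lemma pv_foldl_flatMap {α β γ : Type} (l : List α) (f : α → List β) (g : γ → β → γ) (init : γ) :
    (l.flatMap f).foldl g init = l.foldl (fun st a => (f a).foldl g st) init := by
  induction l generalizing init with
  | nil => rfl
  | cons a l ih => simp [List.flatMap_cons, List.foldl_append, ih]

lemma pv_nested (m : List (List Int)) (L px py : Int) (init : Option (List (List Int) × Bool × Int × Int)) :
    (PySem.List.pyRange 0 L 1).foldl
      (fun st i => (PySem.List.pyRange 0 L 1).foldl (fun st j => pvChangeStep m L px py st i j) st) init
    = (pvCells L).foldl (fun st p => pvChangeStep m L px py st p.1 p.2) init := by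
  rw [pvCells, pv_foldl_flatMap]
  simp [List.foldl_map]

lemma mem_pvCells (L : Int) (p : Int × Int) : p ∈ pvCells L ↔ pvInW L p := by
  obtain ⟨a, b⟩ := p
  simp only [pvCells, List.mem_flatMap, List.mem_map, PySem.List.mem_pyRange_one, Prod.mk.injEq, pvInW]
  constructor
  · rintro ⟨i, hi, j, hj, rfl, rfl⟩; exact ⟨hi.1, hi.2, hj.1, hj.2⟩
  · rintro ⟨h1, h2, h3, h4⟩; exact ⟨a, ⟨h1, h2⟩, b, ⟨h3, h4⟩, rfl, rfl⟩

lemma nodup_pvCells (L : Int) : (pvCells L).Nodup :=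
  List.Nodup.product (PySem.List.nodup_pyRange_one 0 L) (PySem.List.nodup_pyRange_one 0 L)

lemma pv_foldl_none (m : List (List Int)) (L px py : Int) (l : List (Int × Int)) :
    l.foldl (fun st p => pvChangeStep m L px py st p.1 p.2) none = none := by
  induction l with
  | nil => rfl
  | cons c l ih => simpa [pvChangeStep] using ih

-- phase after the swap: changedTile is true, every cell is copied unless it is the saved one
lemma pv_phase3 (m : List (List Int)) (L px py : Int) (l : List (Int × Int))
    (r : List (List Int)) (sX sY : Int) :
    l.foldl (fun st p => pvChangeStep m L px py st p.1 p.2) (some (r, true, sX, sY))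
    = some (l.foldl (pvSkip m (sX, sY)) r, true, sX, sY) := by
  induction l generalizing r with
  | nil => rfl
  | cons c l ih =>
    simp only [List.foldl_cons]
    rw [show pvChangeStep m L px py (some (r, true, sX, sY)) c.1 c.2
        = some (pvSkip m (sX, sY) r c, true, sX, sY) from ?_, ih]
    simp only [pvChangeStep, pvSkip, pvCopy, pvG]
    by_cases h : c.1 ≠ sY ∨ c.2 ≠ sX <;> simp [h]

-- phase before any zero: every cell is nonzero and just gets copied
lemma pv_phase1 (m : List (List Int)) (L px py : Int) (l : List (Int × Int))
    (h : ∀ p ∈ l, pvG m p ≠ 0 ∧ 0 ≤ p.1 ∧ 0 ≤ p.2) (r : List (List Int)) :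
    l.foldl (fun st p => pvChangeStep m L px py st p.1 p.2) (some (r, false, -1, -1))
    = some (l.foldl (pvCopy m) r, false, -1, -1) := by
  induction l generalizing r with
  | nil => rfl
  | cons c l ih =>
    obtain ⟨h0, h1, h2⟩ := h c (List.mem_cons_self ..)
    simp only [List.foldl_cons]
    rw [show pvChangeStep m L px py (some (r, false, -1, -1)) c.1 c.2
        = some (pvCopy m r c, false, -1, -1) from ?_]
    · exact ih (fun p hp => h p (List.mem_cons_of_mem _ hp)) _
    · simp only [pvChangeStep, pvCopy, pvG] at h0 ⊢
      have hne : c.1 ≠ -1 ∨ c.2 ≠ -1 := by omega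
      simp [h0, hne]

-- ===== pointwise get/set reasoning =====
lemma pv_set2_eq (r : List (List Int)) (p : Int × Int) (v : Int)
    (ha : 0 ≤ p.1) (hb : p.1.toNat < r.length) (hc : 0 ≤ p.2) :
    pvSet2 r p.1 p.2 v = r.set p.1.toNat (r[p.1.toNat].set p.2.toNat v) := by
  unfold pvSet2
  rw [PySem.List.pySetD_of_nonneg _ _ ha, PySem.List.pySetD_of_nonneg _ _ hc,
      PySem.List.pyGetD_eq_getElem _ _ ha (by omega)]

lemma pv_get2_eq (r : List (List Int)) (p : Int × Int)
    (ha : 0 ≤ p.1) (hb : p.1.toNat < r.length) (hc : 0 ≤ p.2) (hd : p.2.toNat < r[p.1.toNat].length) :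
    pvG r p = r[p.1.toNat][p.2.toNat] := by
  unfold pvG pvGet2
  rw [PySem.List.pyGetD_eq_getElem _ _ ha (by omega),
      PySem.List.pyGetD_eq_getElem _ _ hc (by omega)]

lemma pv_shape_set2 (L : Int) (r : List (List Int)) (hr : pvShape L r) (p : Int × Int)
    (hp : pvInW L p) (v : Int) : pvShape L (pvSet2 r p.1 p.2 v) := by
  obtain ⟨hr1, hr2⟩ := hr
  obtain ⟨ha, hb, hc, hd⟩ := hp
  have hi : p.1.toNat < r.length := by omega
  rw [pv_set2_eq r p v ha hi hc]
  refine ⟨by simpa using hr1, ?_⟩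
  intro row hrow
  rcases List.mem_or_eq_of_mem_set hrow with h | h
  · exact hr2 row h
  · subst h
    simpa using hr2 _ (List.getElem_mem hi)

lemma pv_get_set2_same (L : Int) (r : List (List Int)) (hr : pvShape L r) (p : Int × Int)
    (hp : pvInW L p) (v : Int) : pvG (pvSet2 r p.1 p.2 v) p = v := by
  obtain ⟨hr1, hr2⟩ := hr
  obtain ⟨ha, hb, hc, hd⟩ := hp
  have hi : p.1.toNat < r.length := by omega
  have hrowlen : r[p.1.toNat].length = L.toNat := hr2 _ (List.getElem_mem hi)
  rw [pv_set2_eq r p v ha hi hc]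
  rw [pv_get2_eq _ p ha (by simpa using hi) hc
      (by rw [List.getElem_set_self (by simpa using hi)]; simp only [List.length_set]; omega)]
  simp

lemma pv_get_set2_ne (L : Int) (r : List (List Int)) (hr : pvShape L r) (p q : Int × Int)
    (hp : pvInW L p) (hq : pvInW L q) (hne : q ≠ p) (v : Int) :
    pvG (pvSet2 r p.1 p.2 v) q = pvG r q := by
  obtain ⟨hr1, hr2⟩ := hr
  obtain ⟨ha, hb, hc, hd⟩ := hp
  obtain ⟨qa, qb, qc, qd⟩ := hq
  have hi : p.1.toNat < r.length := by omega
  have hqi : q.1.toNat < r.length := by omega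
  have hplen : r[p.1.toNat].length = L.toNat := hr2 _ (List.getElem_mem hi)
  have hqlen : r[q.1.toNat].length = L.toNat := hr2 _ (List.getElem_mem hqi)
  rw [pv_set2_eq r p v ha hi hc]
  rw [pv_get2_eq _ q qa (by simpa using hqi) qc ?hlen]
  case hlen =>
    rw [List.getElem_set (by simpa using hqi)]
    split
    · simp only [List.length_set]; omega
    · omega
  rw [pv_get2_eq r q qa hqi qc (by omega)]
  simp only [List.getElem_set]
  split
  · rename_i hrow
    have hq1 : q.1 = p.1 := by omega
    have hq2 : q.2 ≠ p.2 := fun h2 => hne (Prod.ext hq1 h2)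
    rw [List.getElem_set (by simp only [List.length_set]; simp only [hplen]; omega), if_neg (by omega)]
    simp [hrow]
  · rfl

lemma pv_shape_foldl_copy (m : List (List Int)) (L : Int) (l : List (Int × Int))
    (hl : ∀ p ∈ l, pvInW L p) (r : List (List Int)) (hr : pvShape L r) :
    pvShape L (l.foldl (pvCopy m) r) := by
  induction l generalizing r with
  | nil => exact hr
  | cons c l ih =>
    exact ih (fun p hp => hl p (List.mem_cons_of_mem _ hp))
      _ (pv_shape_set2 L r hr c (hl c (List.mem_cons_self ..)) _)

lemma pv_shape_foldl_skip (m : List (List Int)) (L : Int) (s : Int × Int) (l : List (Int × Int))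
    (hl : ∀ p ∈ l, pvInW L p) (r : List (List Int)) (hr : pvShape L r) :
    pvShape L (l.foldl (pvSkip m s) r) := by
  induction l generalizing r with
  | nil => exact hr
  | cons c l ih =>
    refine ih (fun p hp => hl p (List.mem_cons_of_mem _ hp)) _ ?_
    unfold pvSkip
    split
    · exact pv_shape_set2 L r hr c (hl c (List.mem_cons_self ..)) _
    · exact hr

lemma pv_get_foldl_copy (m : List (List Int)) (L : Int) (l : List (Int × Int))
    (hl : ∀ p ∈ l, pvInW L p) (r : List (List Int)) (hr : pvShape L r)
    (q : Int × Int) (hq : pvInW L q) :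
    pvG (l.foldl (pvCopy m) r) q = if q ∈ l then pvG m q else pvG r q := by
  induction l generalizing r with
  | nil => simp
  | cons c l ih =>
    have hc := hl c (List.mem_cons_self ..)
    have hstep : pvShape L (pvCopy m r c) := pv_shape_set2 L r hr c hc _
    simp only [List.foldl_cons]
    rw [ih (fun p hp => hl p (List.mem_cons_of_mem _ hp)) _ hstep]
    by_cases hmem : q ∈ l
    · simp [hmem]
    · by_cases hqc : q = c
      · subst hqc
        simp only [hmem, if_false, List.mem_cons, true_or, if_true]
        exact pv_get_set2_same L r hr q hq _
      · simp only [List.mem_cons, hmem, hqc, or_self, if_false]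
        exact pv_get_set2_ne L r hr c q hc hq hqc _

lemma pv_get_foldl_skip (m : List (List Int)) (L : Int) (s : Int × Int) (l : List (Int × Int))
    (hl : ∀ p ∈ l, pvInW L p) (r : List (List Int)) (hr : pvShape L r)
    (q : Int × Int) (hq : pvInW L q) :
    pvG (l.foldl (pvSkip m s) r) q
    = if q ∈ l ∧ q ≠ (s.2, s.1) then pvG m q else pvG r q := by
  induction l generalizing r with
  | nil => simp
  | cons c l ih =>
    have hc := hl c (List.mem_cons_self ..)
    have hstep : pvShape L (pvSkip m s r c) := by
      unfold pvSkip
      split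
      · exact pv_shape_set2 L r hr c hc _
      · exact hr
    have hGstep : pvG (pvSkip m s r c) q = if q = c ∧ q ≠ (s.2, s.1) then pvG m q else pvG r q := by
      unfold pvSkip pvCopy
      by_cases hqc : q = c
      · subst hqc
        by_cases hsav : q = (s.2, s.1)
        · rw [if_neg (by simp [hsav]), if_neg (by simp [hsav])]
        · have hcond : q.1 ≠ s.2 ∨ q.2 ≠ s.1 := by
            by_contra hno
            simp only [not_or, ne_eq, not_not] at hno
            exact hsav (Prod.ext hno.1 hno.2)
          rw [if_pos hcond, if_pos ⟨rfl, hsav⟩]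
          exact pv_get_set2_same L r hr q hq _
      · rw [show (if q = c ∧ q ≠ (s.2, s.1) then pvG m q else pvG r q) = pvG r q from
            if_neg (by simp [hqc])]
        split
        · exact pv_get_set2_ne L r hr c q hc hq hqc _
        · rfl
    simp only [List.foldl_cons]
    rw [ih (fun p hp => hl p (List.mem_cons_of_mem _ hp)) _ hstep, hGstep]
    by_cases hsav : q = (s.2, s.1)
    · simp [hsav]
    · by_cases hmem : q ∈ l
      · simp [hmem, hsav]
      · by_cases hqc : q = c
        · subst hqc; simp [hsav, hmem]
        · simp [hmem, hqc, hsav]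

-- extensionality for matrices of the window shape
lemma pv_mat_ext (L : Int) (r1 r2 : List (List Int)) (h1 : pvShape L r1) (h2 : pvShape L r2)
    (h : ∀ p, pvInW L p → pvG r1 p = pvG r2 p) : r1 = r2 := by
  obtain ⟨h1a, h1b⟩ := h1
  obtain ⟨h2a, h2b⟩ := h2
  apply List.ext_getElem (by omega)
  intro i hi1 hi2
  have hrow1 : r1[i].length = L.toNat := h1b _ (List.getElem_mem hi1)
  have hrow2 : r2[i].length = L.toNat := h2b _ (List.getElem_mem hi2)
  apply List.ext_getElem (by omega)
  intro j hj1 hj2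
  have hin : pvInW L ((i : Int), (j : Int)) := ⟨by omega, by omega, by omega, by omega⟩
  have hh := h ((i : Int), (j : Int)) hin
  rw [pv_get2_eq r1 _ (by omega) (by simpa using hi1) (by omega) (by simpa using hj1),
      pv_get2_eq r2 _ (by omega) (by simpa using hi2) (by omega) (by simpa using hj2)] at hh
  simpa using hh

lemma pv_shape_copyM (m : List (List Int)) (L : Int) : pvShape L (pvCopyM m L) := by
  unfold pvShape pvCopyM
  constructor
  · simp [PySem.List.length_pyRange_one]
  · intro row hrow
    simp only [List.mem_map] at hrow
    obtain ⟨i, _, rfl⟩ := hrow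
    simp [PySem.List.length_pyRange_one]

lemma pv_shape_R0 (L : Int) : pvShape L (pvR0 L) := by
  unfold pvShape pvR0
  constructor
  · simp [PySem.List.length_pyRange_one]
  · intro row hrow
    simp only [List.mem_map] at hrow
    obtain ⟨i, _, rfl⟩ := hrow
    simp [PySem.List.length_pyRange_one]

lemma pv_get_copyM (m : List (List Int)) (L : Int) (q : Int × Int) (hq : pvInW L q) :
    pvG (pvCopyM m L) q = pvG m q := by
  obtain ⟨qa, qb, qc, qd⟩ := hq
  unfold pvG pvCopyM pvGet2
  rw [PySem.List.pyGetD_map_pyRange_of_nonneg _ L q.1 _ qa qb,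
      PySem.List.pyGetD_map_pyRange_of_nonneg _ L q.2 _ qc qd]

-- the common final step: copy l1, swap (z gets w, t gets 0), then copy l2 skipping t
lemma pv_final_eq (m : List (List Int)) (L : Int) (l1 l2 : List (Int × Int)) (z t : Int × Int)
    (w : Int) (hsplit : pvCells L = l1 ++ z :: l2) (ht : pvInW L t) (hzt : z ≠ t) :
    l2.foldl (pvSkip m (t.2, t.1))
      (pvSet2 (pvSet2 (l1.foldl (pvCopy m) (pvR0 L)) z.1 z.2 w) t.1 t.2 0)
    = pvSet2 (pvSet2 (pvCopyM m L) z.1 z.2 w) t.1 t.2 0 := by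
  have hz : pvInW L z := by
    rw [← mem_pvCells, hsplit]
    exact List.mem_append_right _ (List.mem_cons_self ..)
  have hl1 : ∀ p ∈ l1, pvInW L p := fun p hp => by
    rw [← mem_pvCells, hsplit]; exact List.mem_append_left _ hp
  have hl2 : ∀ p ∈ l2, pvInW L p := fun p hp => by
    rw [← mem_pvCells, hsplit]
    exact List.mem_append_right _ (List.mem_cons_of_mem _ hp)
  have hznotl2 : z ∉ l2 := by
    have := nodup_pvCells L
    rw [hsplit] at this
    have := (List.nodup_append.mp this).2.1
    exact (List.nodup_cons.mp this).1
  have hr1 : pvShape L (l1.foldl (pvCopy m) (pvR0 L)) :=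
    pv_shape_foldl_copy m L l1 hl1 _ (pv_shape_R0 L)
  have hM1a : pvShape L (pvSet2 (l1.foldl (pvCopy m) (pvR0 L)) z.1 z.2 w) :=
    pv_shape_set2 L _ hr1 z hz w
  have hM1 : pvShape L (pvSet2 (pvSet2 (l1.foldl (pvCopy m) (pvR0 L)) z.1 z.2 w) t.1 t.2 0) :=
    pv_shape_set2 L _ hM1a t ht 0
  have hM2a : pvShape L (pvSet2 (pvCopyM m L) z.1 z.2 w) :=
    pv_shape_set2 L _ (pv_shape_copyM m L) z hz w
  have hM2 : pvShape L (pvSet2 (pvSet2 (pvCopyM m L) z.1 z.2 w) t.1 t.2 0) :=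
    pv_shape_set2 L _ hM2a t ht 0
  apply pv_mat_ext L _ _ (pv_shape_foldl_skip m L (t.2, t.1) l2 hl2 _ hM1) hM2
  intro q hq
  rw [pv_get_foldl_skip m L (t.2, t.1) l2 hl2 _ hM1 q hq]
  simp only [Prod.mk.eta]
  by_cases hqt : q = t
  · subst hqt
    simp only [ne_eq, not_true_eq_false, and_false, if_false]
    rw [pv_get_set2_same L _ hM1a q hq 0, pv_get_set2_same L _ hM2a q hq 0]
  · by_cases hqz : q = z
    · subst hqz
      have : q ∉ l2 := hznotl2
      simp only [this, false_and, if_false]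
      rw [pv_get_set2_ne L _ hM1a t q ht hq hqt 0, pv_get_set2_ne L _ hM2a t q ht hq hqt 0,
          pv_get_set2_same L _ hr1 q hq w, pv_get_set2_same L _ (pv_shape_copyM m L) q hq w]
    · have hrhs : pvG (pvSet2 (pvSet2 (pvCopyM m L) z.1 z.2 w) t.1 t.2 0) q = pvG m q := by
        rw [pv_get_set2_ne L _ hM2a t q ht hq hqt 0,
            pv_get_set2_ne L _ (pv_shape_copyM m L) z q hz hq hqz w,
            pv_get_copyM m L q hq]
      by_cases hql2 : q ∈ l2
      · simp [hql2, hqt, hrhs]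
      · have hql1 : q ∈ l1 := by
          have : q ∈ pvCells L := (mem_pvCells L q).mpr hq
          rw [hsplit] at this
          rcases List.mem_append.mp this with h | h
          · exact h
          · rcases List.mem_cons.mp h with h | h
            · exact absurd h hqz
            · exact absurd h hql2
        simp only [hql2, false_and, if_false]
        rw [pv_get_set2_ne L _ hM1a t q ht hq hqt 0,
            pv_get_set2_ne L _ hr1 z q hz hq hqz w,
            pv_get_foldl_copy m L l1 hl1 _ (pv_shape_R0 L) q hq, if_pos hql1, hrhs]

-- main equality of the two ports (holds for every input)
lemma pv_ports_eq (m : List (List Int)) (L px py : Int) :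
    change_tile m L px py = change_tile_alt m L px py := by
  have hA0 : change_tile m L px py
      = Option.map (fun s => s.1)
          ((pvCells L).foldl (fun st p => pvChangeStep m L px py st p.1 p.2)
            (some (pvR0 L, false, -1, -1))) := by
    unfold change_tile
    simp only []
    rw [pv_nested m L px py]
    rfl
  have hB0 : change_tile_alt m L px py
      = (match (pvCells L).find? (fun p => pvGet2 m p.1 p.2 == 0) with
         | none => some (pvCopyM m L)
         | some (i, j) =>
           if px ≠ 0 ∧ 0 ≤ j + px ∧ j + px < L then
             some (pvSet2 (pvSet2 (pvCopyM m L) i j (pvGet2 m i (j + px))) i (j + px) 0)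
           else if py ≠ 0 ∧ 0 ≤ i + py ∧ i + py < L then
             some (pvSet2 (pvSet2 (pvCopyM m L) i j (pvGet2 m (i + py) j)) (i + py) j 0)
           else none) := rfl
  rw [hA0, hB0]
  cases hfind : (pvCells L).find? (fun p => pvGet2 m p.1 p.2 == 0) with
  | none =>
    have hall := List.find?_eq_none.mp hfind
    have h : ∀ p ∈ pvCells L, pvG m p ≠ 0 ∧ 0 ≤ p.1 ∧ 0 ≤ p.2 := by
      intro p hp
      have h1 := hall p hp
      have h2 := (mem_pvCells L p).mp hp
      refine ⟨by simpa [pvG] using h1, h2.1, h2.2.2.1⟩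
    rw [pv_phase1 m L px py _ h (pvR0 L)]
    simp only [Option.map_some]
    congr 1
    exact pv_mat_ext L _ _
      (pv_shape_foldl_copy m L _ (fun p hp => (mem_pvCells L p).mp hp) _ (pv_shape_R0 L))
      (pv_shape_copyM m L)
      (fun q hq => by
        rw [pv_get_foldl_copy m L _ (fun p hp => (mem_pvCells L p).mp hp) _ (pv_shape_R0 L) q hq,
            if_pos ((mem_pvCells L q).mpr hq), pv_get_copyM m L q hq])
  | some z =>
    obtain ⟨hz0, l1, l2, hsplit, hl1⟩ := List.find?_eq_some_iff_append.mp hfind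
    have hzmem : pvInW L z := by
      rw [← mem_pvCells, hsplit]
      exact List.mem_append_right _ (List.mem_cons_self ..)
    have hzv : pvGet2 m z.1 z.2 = 0 := by simpa using hz0
    have hcopyl1 : ∀ p ∈ l1, pvG m p ≠ 0 ∧ 0 ≤ p.1 ∧ 0 ≤ p.2 := by
      intro p hp
      have h1 := hl1 p hp
      have h2 := (mem_pvCells L p).mp (by rw [hsplit]; exact List.mem_append_left _ hp)
      refine ⟨by simpa [pvG] using h1, h2.1, h2.2.2.1⟩
    rw [hsplit, List.foldl_append, pv_phase1 m L px py l1 hcopyl1 (pvR0 L), List.foldl_cons]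
    obtain ⟨zi, zj⟩ := z
    have hzv' : pvGet2 m zi zj = 0 := hzv
    have hstep : pvChangeStep m L px py (some (l1.foldl (pvCopy m) (pvR0 L), false, -1, -1)) (zi, zj).1 (zi, zj).2
        = (if px ≠ 0 ∧ zj + px < L ∧ zj + px ≥ 0 then
            some (pvSet2 (pvSet2 (l1.foldl (pvCopy m) (pvR0 L)) zi zj (pvGet2 m zi (zj + px))) zi (zj + px) 0, true, zj + px, zi)
          else if py ≠ 0 ∧ zi + py < L ∧ zi + py ≥ 0 then
            some (pvSet2 (pvSet2 (l1.foldl (pvCopy m) (pvR0 L)) zi zj (pvGet2 m (zi + py) zj)) (zi + py) zj 0, true, zj, zi + py)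
          else none) := by
      simp only [pvChangeStep]
      rw [if_pos (by simp [hzv'])]
    rw [hstep]
    dsimp only
    by_cases hx : px ≠ 0 ∧ zj + px < L ∧ zj + px ≥ 0
    · rw [if_pos hx, pv_phase3]
      have hx' : px ≠ 0 ∧ 0 ≤ zj + px ∧ zj + px < L := ⟨hx.1, hx.2.2, hx.2.1⟩
      rw [if_pos hx']
      simp only [Option.map_some]
      congr 1
      exact pv_final_eq m L l1 l2 (zi, zj) (zi, zj + px) (pvGet2 m zi (zj + px)) hsplit
        ⟨hzmem.1, hzmem.2.1, hx.2.2, hx.2.1⟩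
        (by simp only [ne_eq, Prod.mk.injEq]; intro h; exact hx.1 (by omega))
    · rw [if_neg hx]
      have hx' : ¬(px ≠ 0 ∧ 0 ≤ zj + px ∧ zj + px < L) := fun h => hx ⟨h.1, h.2.2, h.2.1⟩
      rw [if_neg hx']
      by_cases hy : py ≠ 0 ∧ zi + py < L ∧ zi + py ≥ 0
      · rw [if_pos hy, pv_phase3]
        have hy' : py ≠ 0 ∧ 0 ≤ zi + py ∧ zi + py < L := ⟨hy.1, hy.2.2, hy.2.1⟩
        rw [if_pos hy']
        simp only [Option.map_some]
        congr 1
        exact pv_final_eq m L l1 l2 (zi, zj) (zi + py, zj) (pvGet2 m (zi + py) zj) hsplit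
          ⟨hy.2.2, hy.2.1, hzmem.2.2.1, hzmem.2.2.2⟩
          (by simp only [ne_eq, Prod.mk.injEq]; intro h; exact hy.1 (by omega))
      · rw [if_neg hy, pv_foldl_none]
        have hy' : ¬(py ≠ 0 ∧ 0 ≤ zi + py ∧ zi + py < L) := fun h => hy ⟨h.1, h.2.2, h.2.1⟩
        rw [if_neg hy']
        rfl

-- ===== VERDICT (by name: the statement is the Claim_ definition above) =====
theorem change_tile_spec : Claim_equal_change_tile := by
  intro m L px py _ _
  unfold Spec_change_tile
  exact pv_ports_eq m L px py
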